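-- pv_equiv track=rewrite | github.com/lifesci/advent_of_code | 2015/15/python/solution.py | balls_in_bins
-- ===== SOURCE A (Python) =====
-- def balls_in_bins(balls, bins):
--     if bins == 0:
--         yield []
--     elif bins == 1:
--         yield [balls]
--     elif balls == 0:
--         yield [0]*bins
--     else:
--         for i in range(balls + 1):
--             for j in balls_in_bins(i, bins - 1):
--                 yield [balls - i] + j
-- ===== SOURCE B (Python) =====
-- def balls_in_bins(balls, bins):
--     # DP over the number of bins (one table per level) instead of nested recursive generators.
--     if bins == 0:
--         yield []
--         return
--     if bins == 1:
--         yield [balls]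
--         return
--     if balls < 0 or bins < 0:
--         return
--     if balls == 0:
--         yield [0] * bins
--         return
--     # table[t] = all compositions of t into k bins in descending-lex order; k starts at 1
--     table = [[[t]] for t in range(balls + 1)]
--     for _ in range(bins - 2):
--         table = [[[t - i] + j for i in range(t + 1) for j in table[i]]
--                  for t in range(balls + 1)]
--     # final row: only the entry for `balls` is needed
--     yield from ([balls - i] + j for i in range(balls + 1) for j in table[i])
-- ===== Notes on version B (the rewrite author's own statement) =====
-- stated objective: alternative
-- what changed: Replaces the nested recursive generators with an iterative bottom-up DP: a table of composition lists per remaining total, rebuilt once per extra bin, so there is no recursion and no re-entered generator chain.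
-- intended difference: For balls == 0 with bins < 0, A accidentally yields [0]*bins == [] (so returns [[]]) as an artefact of Python list repetition on a negative count; B yields nothing ([]), the intended value since there is no composition into a negative number of bins. — e.g. on balls_in_bins(0, -1): A returns [[]], B returns []
import Mathlib
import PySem

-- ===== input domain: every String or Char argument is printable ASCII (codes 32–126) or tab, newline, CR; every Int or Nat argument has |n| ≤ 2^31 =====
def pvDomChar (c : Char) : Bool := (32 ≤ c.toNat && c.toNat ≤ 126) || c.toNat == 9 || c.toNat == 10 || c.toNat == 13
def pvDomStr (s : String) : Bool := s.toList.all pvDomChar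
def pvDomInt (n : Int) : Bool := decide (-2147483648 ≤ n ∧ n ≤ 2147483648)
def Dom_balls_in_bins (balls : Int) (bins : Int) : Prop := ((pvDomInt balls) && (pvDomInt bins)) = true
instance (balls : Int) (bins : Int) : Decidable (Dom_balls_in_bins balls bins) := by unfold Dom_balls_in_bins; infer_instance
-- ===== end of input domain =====

-- B replaces A's nested recursive generators by an iterative bottom-up DP table (alternative
-- decomposition, similar cost); A and B are generators in Python, the ports return the list of
-- yielded values.


-- ===== PORT A =====
-- fuel = bins.toNat; the recursion calls bins-1, so fuel never runs out when bins ≥ 0.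
-- (For bins < 0 with balls ≠ 0 the Python recursion never terminates — excluded by Pre_.)
def ballsGoA (fuel : Nat) (balls bins : Int) : List (List Int) :=
  if bins = 0 then [[]]
  else if bins = 1 then [[balls]]
  else if balls = 0 then [List.replicate bins.toNat 0]   -- [0]*bins (empty list for bins < 0)
  else match fuel with
    | 0 => []
    | f+1 =>
      (PySem.List.pyRange 0 (balls+1) 1).foldl
        (fun acc i => acc ++ (ballsGoA f i (bins-1)).map (fun j => (balls - i) :: j)) []

def balls_in_bins (balls : Int) (bins : Int) : List (List Int) :=
  ballsGoA bins.toNat balls bins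

-- ===== PORT B =====
-- one DP step: table[t] = [[t-i]+j for i in range(t+1) for j in table[i]]
def ballsAltStep (balls : Int) (table : List (List (List Int))) : List (List (List Int)) :=
  (PySem.List.pyRange 0 (balls+1) 1).map (fun t =>
    (PySem.List.pyRange 0 (t+1) 1).flatMap (fun i =>
      (PySem.List.pyGetD table i []).map (fun j => (t - i) :: j)))

def balls_in_bins_alt (balls : Int) (bins : Int) : List (List Int) :=
  if bins = 0 then [[]]
  else if bins = 1 then [[balls]]
  else if balls < 0 ∨ bins < 0 then []
  else if balls = 0 then [List.replicate bins.toNat 0]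
  else
    let table0 := (PySem.List.pyRange 0 (balls+1) 1).map (fun t => [[t]])
    let table := (List.range (bins-2).toNat).foldl (fun tab _ => ballsAltStep balls tab) table0
    -- final row: only the entry for `balls` is needed
    (PySem.List.pyRange 0 (balls+1) 1).flatMap (fun i =>
      (PySem.List.pyGetD table i []).map (fun j => (balls - i) :: j))

-- ===== PRECONDITION & SPEC =====
-- Pre_ excludes exactly balls ≥ 1 with bins < 0, where A's recursion on bins-1 never
-- bottoms out and Python raises RecursionError.
def Pre_balls_in_bins (balls : Int) (bins : Int) : Prop := 0 ≤ bins ∨ balls ≤ 0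
instance (balls : Int) (bins : Int) : Decidable (Pre_balls_in_bins balls bins) := by unfold Pre_balls_in_bins; infer_instance
def pvWitness_balls_in_bins : Int × Int := (3, 3)


-- For balls == 0 with bins < 0, A accidentally yields [0]*bins == [] (so returns [[]]) as an
-- artefact of Python list repetition on a negative count; B yields nothing ([]), the intended
-- value since there is no composition into a negative number of bins.
def D_balls_in_bins (balls : Int) (bins : Int) : Prop := balls = 0 ∧ bins < 0
instance (balls : Int) (bins : Int) : Decidable (D_balls_in_bins balls bins) := by unfold D_balls_in_bins; infer_instance

def Spec_balls_in_bins (balls : Int) (bins : Int) (out : List (List Int)) : Prop :=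
  ¬ D_balls_in_bins balls bins → out = balls_in_bins_alt balls bins
instance (balls : Int) (bins : Int) (out : List (List Int)) : Decidable (Spec_balls_in_bins balls bins out) := by unfold Spec_balls_in_bins; infer_instance

def pvDiffWitness_balls_in_bins : Int × Int := (0, -1)
def pvDiffWitnessOut_balls_in_bins : (List (List Int)) × (List (List Int)) := ([[]], [])

-- ===== CLAIM (what is proved, stated in full; the proofs are below) =====
def Claim_unchanged_balls_in_bins : Prop := ∀ (balls : Int) (bins : Int), Dom_balls_in_bins balls bins → Pre_balls_in_bins balls bins → Spec_balls_in_bins balls bins (balls_in_bins balls bins)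
def Claim_changed_balls_in_bins : Prop := Dom_balls_in_bins (pvDiffWitness_balls_in_bins.1) (pvDiffWitness_balls_in_bins.2) ∧ Pre_balls_in_bins (pvDiffWitness_balls_in_bins.1) (pvDiffWitness_balls_in_bins.2) ∧ D_balls_in_bins (pvDiffWitness_balls_in_bins.1) (pvDiffWitness_balls_in_bins.2) ∧ balls_in_bins (pvDiffWitness_balls_in_bins.1) (pvDiffWitness_balls_in_bins.2) = pvDiffWitnessOut_balls_in_bins.1 ∧ balls_in_bins_alt (pvDiffWitness_balls_in_bins.1) (pvDiffWitness_balls_in_bins.2) = pvDiffWitnessOut_balls_in_bins.2 ∧ pvDiffWitnessOut_balls_in_bins.1 ≠ pvDiffWitnessOut_balls_in_bins.2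
def Claim_exact_balls_in_bins : Prop := ∀ (balls : Int) (bins : Int), Dom_balls_in_bins balls bins → Pre_balls_in_bins balls bins → D_balls_in_bins balls bins → balls_in_bins balls bins ≠ balls_in_bins_alt balls bins

-- ===== LEMMAS AND PROOFS =====

-- A's result as a function of (balls, bins) for bins ≥ 0, with fuel = bins
def ballsF (t : Int) (k : Nat) : List (List Int) := ballsGoA k t (k : Int)

theorem ballsF_zero (k : Nat) (hk : 1 ≤ k) : ballsF 0 k = [List.replicate k 0] := by
  unfold ballsF
  rw [ballsGoA.eq_def]
  rcases Nat.lt_or_ge k 2 with h | h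
  · interval_cases k
    simp
  · have h0 : (k : Int) ≠ 0 := by omega
    have h1 : (k : Int) ≠ 1 := by omega
    simp [h1]

theorem ballsF_rec (t : Int) (k : Nat) (hk : 1 ≤ k) (ht : 0 ≤ t) :
    ballsF t (k+1) =
      (PySem.List.pyRange 0 (t+1) 1).flatMap (fun i => (ballsF i k).map (fun j => (t - i) :: j)) := by
  rcases eq_or_lt_of_le ht with h0 | h0
  · subst h0
    rw [ballsF_zero (k+1) (by omega)]
    rw [PySem.List.pyRange_one_singleton 0]
    simp [ballsF_zero k hk, List.replicate_succ]
  · unfold ballsF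
    rw [ballsGoA.eq_def]
    have h0' : (t : Int) ≠ 0 := by omega
    have hb0 : ((k:Int)+1) ≠ 0 := by omega
    have hb1 : ((k:Int)+1) ≠ 1 := by omega
    have hc : ((k : Int) + 1 : Int) - 1 = (k : Int) := by ring
    simp only [Nat.cast_add, Nat.cast_one, hb0, hb1, h0', if_false, hc]
    rw [PySem.List.foldl_append_eq_flatMap]
    simp

theorem ballsTable (balls : Int) (m : Nat) :
    ∀ t : Int, 0 ≤ t → t ≤ balls →
    PySem.List.pyGetD
      ((List.range m).foldl (fun tab _ => ballsAltStep balls tab)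
        ((PySem.List.pyRange 0 (balls+1) 1).map (fun t => [[t]]))) t []
    = ballsF t (m+1) := by
  induction m with
  | zero =>
    intro t h0 h1
    simp only [List.range_zero, List.foldl_nil]
    rw [PySem.List.pyGetD_map_pyRange_of_nonneg _ _ _ _ h0 (by omega)]
    unfold ballsF
    rw [ballsGoA.eq_def]
    simp
  | succ m ih =>
    intro t h0 h1
    rw [List.range_succ, List.foldl_append]
    simp only [List.foldl_cons, List.foldl_nil]
    rw [ballsAltStep]
    rw [PySem.List.pyGetD_map_pyRange_of_nonneg _ _ _ _ h0 (by omega)]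
    rw [ballsF_rec t (m+1) (by omega) h0]
    apply List.flatMap_congr
    intro i hi
    rw [PySem.List.mem_pyRange_one] at hi
    rw [ih i hi.1 (by omega)]

-- ===== VERDICT (by name: the statement is the Claim_ definition above) =====
theorem balls_in_bins_spec : Claim_unchanged_balls_in_bins := by
  intro balls bins _ hpre hD
  unfold Pre_balls_in_bins at hpre
  unfold D_balls_in_bins at hD
  unfold balls_in_bins balls_in_bins_alt
  by_cases h0 : bins = 0
  · subst h0
    rw [ballsGoA.eq_def]
    simp
  by_cases h1 : bins = 1
  · subst h1
    rw [ballsGoA.eq_def]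
    simp
  by_cases hneg : balls < 0 ∨ bins < 0
  · simp only [h0, h1, hneg, if_false, if_true]
    rcases Int.lt_or_lt_of_ne (show balls ≠ 0 by rcases hneg with h | h <;> omega) with hb | hb
    · -- balls < 0: A's range(balls+1) is empty (or, for bins < 0, fuel 0), so A yields nothing
      rw [ballsGoA.eq_def]
      simp only [h0, h1, if_false, show balls ≠ 0 by omega]
      rcases Nat.eq_zero_or_pos bins.toNat with hz | hz
      · rw [hz]
      · obtain ⟨f, hf⟩ : ∃ f, bins.toNat = f + 1 := ⟨bins.toNat - 1, by omega⟩
        rw [hf]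
        rw [PySem.List.pyRange_one_eq_nil (by omega)]
        simp
    · -- then bins < 0 and balls > 0: excluded by Pre_
      exact absurd hpre (by omega)
  · -- main case: balls ≥ 0, bins ≥ 2
    rw [not_or] at hneg
    rw [if_neg h0, if_neg h1, if_neg (by omega : ¬(balls < 0 ∨ bins < 0))]
    by_cases hz : balls = 0
    · subst hz
      rw [if_pos rfl, ballsGoA.eq_def]
      simp [h1]
      omega
    rw [if_neg hz]
    symm
    calc (PySem.List.pyRange 0 (balls+1) 1).flatMap (fun i =>
          (PySem.List.pyGetD
            ((List.range (bins-2).toNat).foldl (fun tab _ => ballsAltStep balls tab)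
              ((PySem.List.pyRange 0 (balls+1) 1).map (fun t => [[t]]))) i []).map
            (fun j => (balls - i) :: j))
        = (PySem.List.pyRange 0 (balls+1) 1).flatMap (fun i =>
            (ballsF i ((bins-2).toNat + 1)).map (fun j => (balls - i) :: j)) := by
          apply List.flatMap_congr
          intro i hi
          rw [PySem.List.mem_pyRange_one] at hi
          rw [ballsTable balls (bins-2).toNat i hi.1 (by omega)]
      _ = ballsF balls ((bins-2).toNat + 1 + 1) :=
          (ballsF_rec balls ((bins-2).toNat + 1) (by omega) (by omega)).symm
      _ = ballsGoA bins.toNat balls bins := by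
          unfold ballsF
          rw [show (bins-2).toNat + 1 + 1 = bins.toNat by omega,
              Int.toNat_of_nonneg (by omega : (0:Int) ≤ bins)]

theorem balls_in_bins_changed : Claim_changed_balls_in_bins := by
  unfold Claim_changed_balls_in_bins; decide

theorem balls_in_bins_tight : Claim_exact_balls_in_bins := by
  intro balls bins _ _ hD
  unfold D_balls_in_bins at hD
  obtain ⟨hb, hn⟩ := hD
  subst hb
  unfold balls_in_bins balls_in_bins_alt
  rw [ballsGoA.eq_def]
  have h0 : bins ≠ 0 := by omega
  have h1 : bins ≠ 1 := by omega
  have ht : bins.toNat = 0 := by omega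
  simp [h0, h1, ht, hn]
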